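-- pv_equiv track=rewrite | github.com/DiamondLightSource/Savu | savu/data/data_structures/data.py | add_preview_defaults
-- ===== SOURCE A (Python) =====
-- def add_preview_defaults(plist):
--     nEntries = 4
--     diff_len = [(nEntries - len(elem.split(':'))) for elem in plist]
--     all_idx = [i for i in range(len(plist)) if plist[i] == ':']
--     amend = [i for i in range(len(plist)) if diff_len and i not in all_idx]
--     for idx in amend:
--         plist[idx] += ':1'*diff_len[idx]
--     return plist
-- ===== SOURCE B (Python) =====
-- def add_preview_defaults(plist):
--     for i, elem in enumerate(plist):
--         if elem != ':':
--             parts = elem.split(':')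
--             while len(parts) < 4:
--                 parts.append('1')
--             plist[i] = ':'.join(parts)
--     return plist
-- ===== Notes on version B (the rewrite author's own statement) =====
-- stated objective: alternative
-- what changed: Instead of A's three precomputed index/deficit tables and an index-driven update loop that appends a repeated ':1' string, B splits each non-':' element into its colon-separated parts, pads the parts list up to 4 entries with '1' in a while loop, and rejoins with ':'.
import Mathlib
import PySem

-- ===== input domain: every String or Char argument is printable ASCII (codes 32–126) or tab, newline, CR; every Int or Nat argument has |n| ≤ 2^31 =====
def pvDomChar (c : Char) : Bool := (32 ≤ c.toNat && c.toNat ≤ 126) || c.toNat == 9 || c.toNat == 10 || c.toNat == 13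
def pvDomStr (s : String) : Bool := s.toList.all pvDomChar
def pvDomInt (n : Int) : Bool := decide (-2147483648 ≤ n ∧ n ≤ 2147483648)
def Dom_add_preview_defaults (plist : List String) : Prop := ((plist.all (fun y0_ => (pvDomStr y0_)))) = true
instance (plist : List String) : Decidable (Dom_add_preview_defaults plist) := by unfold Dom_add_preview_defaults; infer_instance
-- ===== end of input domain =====

-- B rewrite: instead of A's precomputed tables (diff_len, all_idx, amend) and an index-driven
-- loop appending a repeated ':1' string, B splits each non-':' element into its parts, pads the
-- parts list to 4 entries with '1' in a while loop, and rejoins with ':'. Objective: alternative.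
-- A (and B) mutate plist in place; the equivalence proved here is about the return value.

-- ':1' * n  (Python string repetition; negative n gives "") — hand port, exact
def pvStrMul (s : String) (n : Int) : String := String.ofList (List.replicate n.toNat s.toList).flatten

-- ===== PORT A =====
def add_preview_defaults (plist : List String) : List String :=
  -- nEntries = 4
  let nEntries : Int := 4
  -- diff_len = [(nEntries - len(elem.split(':'))) for elem in plist]
  let diff_len : List Int := plist.map (fun elem => nEntries - ((PySem.Str.split? elem ":").getD []).length)
  -- all_idx = [i for i in range(len(plist)) if plist[i] == ':']
  let all_idx : List Nat := (List.range plist.length).filter (fun i => plist.getD i "" == ":")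
  -- amend = [i for i in range(len(plist)) if diff_len and i not in all_idx]
  let amend : List Nat := (List.range plist.length).filter
    (fun i => decide (diff_len ≠ []) && !(all_idx.contains i))
  -- for idx in amend: plist[idx] += ':1'*diff_len[idx]
  amend.foldl (fun pl idx => pl.set idx (pl.getD idx "" ++ pvStrMul ":1" (diff_len.getD idx 0))) plist

-- ===== PORT B =====
-- while len(parts) < 4: parts.append('1')
def padParts (parts : List String) : List String :=
  if parts.length < 4 then padParts (parts ++ ["1"]) else parts
termination_by 4 - parts.length
decreasing_by simp; omega

def add_preview_defaults_alt (plist : List String) : List String :=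
  plist.map (fun elem =>
    if elem == ":" then elem
    else PySem.Str.join ":" (padParts ((PySem.Str.split? elem ":").getD [])))

-- ===== PRECONDITION & SPEC =====
def Spec_add_preview_defaults (plist : List String) (out : List String) : Prop := out = add_preview_defaults_alt plist
instance (plist : List String) (out : List String) : Decidable (Spec_add_preview_defaults plist out) := by unfold Spec_add_preview_defaults; infer_instance

-- ===== CLAIM (what is proved, stated in full; the proofs are below) =====
def Claim_equal_add_preview_defaults : Prop := ∀ (plist : List String), Dom_add_preview_defaults plist → Spec_add_preview_defaults plist (add_preview_defaults plist)

-- ===== LEMMAS AND PROOFS =====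

-- a simple structural split on a single character, used only to characterise PySem's splitOn
def splitChar (c : Char) : List Char → List (List Char)
  | [] => [[]]
  | x :: xs =>
    if x = c then [] :: splitChar c xs
    else
      match splitChar c xs with
      | [] => [[x]]
      | h :: t => (x :: h) :: t

theorem splitChar_ne_nil (c : Char) (cs : List Char) : splitChar c cs ≠ [] := by
  cases cs with
  | nil => simp [splitChar]
  | cons x xs =>
    simp only [splitChar]
    split_ifs
    · simp
    · cases splitChar c xs <;> simp

theorem modifyHead_fun_id {α : Type} (l : List α) : List.modifyHead (fun x => x) l = l := by
  cases l <;> simp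

theorem splitOn_go_single (c : Char) :
    ∀ (fuel : Nat) (l cur : List Char) (acc : List (List Char)), l.length ≤ fuel →
    PySem.Chars.splitOn.go [c] fuel l cur acc
      = acc.reverse ++ (splitChar c l).modifyHead (cur.reverse ++ ·) := by
  intro fuel
  induction fuel with
  | zero =>
    intro l cur acc h
    have : l = [] := by cases l <;> simp_all
    subst this
    simp [PySem.Chars.splitOn.go, splitChar]
  | succ n ih =>
    intro l cur acc h
    cases l with
    | nil => simp [PySem.Chars.splitOn.go, splitChar]
    | cons x rest =>
      rw [PySem.Chars.splitOn.go]
      by_cases hx : x = c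
      · subst hx
        have hpre : List.isPrefixOf [x] (x :: rest) = true := by simp [List.isPrefixOf]
        simp only [hpre, if_true, List.length_cons, List.drop_succ_cons, List.length_nil, List.drop_zero]
        rw [ih rest [] (cur.reverse :: acc) (by simpa using Nat.le_of_succ_le_succ h)]
        simp [splitChar, modifyHead_fun_id]
      · -- prefix test is [c].isPrefixOf (x :: rest) = (c = x), false here
        have hpre' : List.isPrefixOf [c] (x :: rest) = false := by
          simp [List.isPrefixOf]; exact fun h' => absurd h'.symm hx
        simp only [hpre', Bool.false_eq_true, if_false]
        rw [ih rest (x :: cur) acc (by simpa using Nat.le_of_succ_le_succ h)]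
        simp only [splitChar, if_neg hx]
        obtain ⟨hd, tl, hht⟩ : ∃ hd tl, splitChar c rest = hd :: tl := by
          cases hh : splitChar c rest with
          | nil => exact absurd hh (splitChar_ne_nil c rest)
          | cons a b => exact ⟨a, b, rfl⟩
        simp [hht]

theorem splitOn_single (c : Char) (cs : List Char) :
    PySem.Chars.splitOn cs [c] = splitChar c cs := by
  unfold PySem.Chars.splitOn
  rw [splitOn_go_single c (cs.length + 1) cs [] [] (by omega)]
  simp [modifyHead_fun_id]

-- join [c] ((x :: h) :: t) prepends x to the head of join [c] (h :: t)
theorem join_cons_head (c x : Char) (h : List Char) (t : List (List Char)) :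
    PySem.Chars.join [c] ((x :: h) :: t) = x :: PySem.Chars.join [c] (h :: t) := by
  cases t with
  | nil => simp [PySem.Chars.join_singleton]
  | cons q r => simp [PySem.Chars.join_cons_cons]

theorem join_splitChar (c : Char) (cs : List Char) :
    PySem.Chars.join [c] (splitChar c cs) = cs := by
  induction cs with
  | nil => simp [splitChar, PySem.Chars.join_singleton]
  | cons x xs ih =>
    by_cases hx : x = c
    · subst hx
      rw [show splitChar x (x :: xs) = [] :: splitChar x xs from by simp [splitChar]]
      obtain ⟨hd, tl, hht⟩ : ∃ hd tl, splitChar x xs = hd :: tl := by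
        cases hh : splitChar x xs with
        | nil => exact absurd hh (splitChar_ne_nil x xs)
        | cons a b => exact ⟨a, b, rfl⟩
      rw [hht, PySem.Chars.join_cons_cons]
      rw [hht] at ih
      simp [ih]
    · simp only [splitChar, if_neg hx]
      obtain ⟨hd, tl, hht⟩ : ∃ hd tl, splitChar c xs = hd :: tl := by
        cases hh : splitChar c xs with
        | nil => exact absurd hh (splitChar_ne_nil c xs)
        | cons a b => exact ⟨a, b, rfl⟩
      rw [hht]
      rw [hht] at ih
      rw [join_cons_head, ih]

theorem join_append_replicate (c x : Char) (k : Nat) :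
    ∀ (parts : List (List Char)), parts ≠ [] →
    PySem.Chars.join [c] (parts ++ List.replicate k [x])
      = PySem.Chars.join [c] parts ++ (List.replicate k [c, x]).flatten := by
  induction k with
  | zero => intro parts _; simp
  | succ n ih =>
    intro parts hne
    rw [List.replicate_succ']
    have hone : ∀ (ps : List (List Char)), ps ≠ [] →
        PySem.Chars.join [c] (ps ++ [[x]]) = PySem.Chars.join [c] ps ++ [c, x] := by
      intro ps
      induction ps with
      | nil => intro h; exact absurd rfl h
      | cons p rest ihp =>
        intro _
        cases rest with
        | nil => simp [PySem.Chars.join_singleton, PySem.Chars.join_cons_cons]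
        | cons q r =>
          have ihp' := ihp (by simp)
          simp only [List.cons_append] at ihp' ⊢
          rw [PySem.Chars.join_cons_cons [c] p q (r ++ [[x]]),
              PySem.Chars.join_cons_cons [c] p q r, ihp']
          simp
    rw [← List.append_assoc, hone _ (by simp [hne]), ih parts hne,
        List.replicate_succ', List.flatten_append]
    simp
  
theorem padParts_eq : ∀ (k : Nat) (parts : List String), 4 - parts.length = k →
    padParts parts = parts ++ List.replicate k "1" := by
  intro k
  induction k with
  | zero =>
    intro parts h
    rw [padParts]
    rw [if_neg (by omega)]
    simp
  | succ n ih =>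
    intro parts h
    rw [padParts, if_pos (by omega)]
    rw [ih (parts ++ ["1"]) (by simp; omega)]
    simp [List.replicate_succ]

-- the per-element fact: appending ':1'*(4 - len parts) equals joining the padded parts
theorem elem_pad_join (elem : String) :
    elem ++ pvStrMul ":1" (4 - (((PySem.Str.split? elem ":").getD []).length : Int))
      = PySem.Str.join ":" (padParts ((PySem.Str.split? elem ":").getD [])) := by
  have hsplit : (PySem.Str.split? elem ":").getD []
      = (splitChar ':' elem.toList).map String.ofList := by
    simp [PySem.Str.split?, PySem.Chars.split?, splitOn_single]
  apply String.toList_inj.mp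
  rw [hsplit]
  set ps := splitChar ':' elem.toList with hps
  have hk : ((4 : Int) - (ps.map String.ofList).length).toNat = 4 - ps.length := by
    simp only [List.length_map]
    omega
  rw [padParts_eq (4 - ps.length) (ps.map String.ofList) (by simp)]
  simp only [PySem.Str.join, String.toList_ofList, String.toList_append, pvStrMul, hk]
  rw [List.map_append, List.map_map, List.map_replicate]
  have hmap : (ps.map (String.toList ∘ String.ofList)) = ps := by
    simp [Function.comp_def]
  have h1 : String.toList "1" = ['1'] := by decide
  have hcolon : String.toList ":" = [':'] := by decide
  rw [hmap, h1, hcolon, join_append_replicate ':' '1' (4 - ps.length) ps (splitChar_ne_nil _ _),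
      hps, join_splitChar]
  have h2 : String.toList ":1" = [':', '1'] := by decide
  rw [h2]

-- a fold of `set` over distinct in-range indices updates exactly those positions
theorem foldl_set_nodup {α : Type} (f : Nat → α → α) (d : α) :
    ∀ (idxs : List Nat) (m : List α), idxs.Nodup → (∀ i ∈ idxs, i < m.length) →
    idxs.foldl (fun acc i => acc.set i (f i (acc.getD i d))) m
      = m.mapIdx (fun i x => if i ∈ idxs then f i x else x) := by
  intro idxs
  induction idxs with
  | nil =>
      intro m _ _
      apply List.ext_getElem <;> simp
  | cons i rest ih =>
      intro m hnd hlt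
      have hi : i < m.length := hlt i (by simp)
      have hnotin : i ∉ rest := (List.nodup_cons.mp hnd).1
      simp only [List.foldl_cons]
      rw [ih (m.set i (f i (m.getD i d))) (List.nodup_cons.mp hnd).2
          (by intro j hj; simpa using hlt j (List.mem_cons_of_mem _ hj))]
      apply List.ext_getElem
      · simp
      · intro j h1 h2
        have hj : j < m.length := by simpa using h1
        simp only [List.getElem_mapIdx]
        by_cases hji : j = i
        · subst hji
          simp [hnotin, List.getD_eq_getElem?_getD, List.getElem?_eq_getElem hj]
        · simp [hji, Ne.symm hji, List.mem_cons]

theorem add_preview_defaults_eq_alt (plist : List String) :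
    add_preview_defaults plist = add_preview_defaults_alt plist := by
  unfold add_preview_defaults add_preview_defaults_alt
  simp only []
  rw [foldl_set_nodup
      (fun i x => x ++ pvStrMul ":1"
        ((plist.map (fun elem => (4 : Int) - (((PySem.Str.split? elem ":").getD []).length : Int))).getD i 0))
      "" _ plist
      ((List.nodup_range).filter _)
      (by intro i hi; exact List.mem_range.mp (List.mem_of_mem_filter hi))]
  apply List.ext_getElem
  · simp
  · intro j h1 h2
    have hj : j < plist.length := by simpa using h1
    have hgd : plist.getD j "" = plist[j] := by
      rw [List.getD_eq_getElem?_getD, List.getElem?_eq_getElem hj]; rfl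
    have hne : plist ≠ [] := by
      intro h; subst h; exact absurd hj (by simp)
    have hmem : (j ∈ (List.range plist.length).filter
        (fun i => decide ((plist.map (fun elem => (4 : Int) - ((PySem.Str.split? elem ":").getD []).length)) ≠ []) &&
          !(((List.range plist.length).filter (fun i => plist.getD i "" == ":")).contains i)))
        ↔ ¬ (plist[j] == ":") = true := by
      simp only [List.mem_filter, List.mem_range, List.contains_eq_mem, hgd]
      constructor
      · rintro ⟨-, h⟩
        simp only [Bool.and_eq_true, Bool.not_eq_true', decide_eq_true_eq] at h
        intro hx
        simp [hj, hx] at h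
      · intro hx
        refine ⟨hj, ?_⟩
        simp only [Bool.and_eq_true, Bool.not_eq_true', decide_eq_true_eq]
        refine ⟨by simpa using hne, ?_⟩
        simp [hx]
    simp only [List.getElem_mapIdx, List.getElem_map]
    by_cases hx : (plist[j] == ":") = true
    · rw [if_neg (by rw [hmem]; simp [hx]), if_pos hx]
    · rw [if_pos (hmem.mpr hx), if_neg hx]
      have hget : (plist.map (fun elem => (4 : Int) - (((PySem.Str.split? elem ":").getD []).length : Int))).getD j 0
          = (4 : Int) - (((PySem.Str.split? plist[j] ":").getD []).length : Int) := by
        rw [List.getD_eq_getElem?_getD, List.getElem?_map, List.getElem?_eq_getElem hj]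
        rfl
      rw [hget, elem_pad_join]

-- ===== VERDICT (by name: the statement is the Claim_ definition above) =====
theorem add_preview_defaults_spec : Claim_equal_add_preview_defaults := by
  intro plist _
  exact (add_preview_defaults_eq_alt plist)
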